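-- pv_equiv track=rewrite | github.com/danfinkel/civics | spike/scripts/ocr_test.py | ocr_improvement_keys
-- ===== SOURCE A (Python) =====
-- def is_empty_string_value(v) -> bool:
--     """True if missing, None, or whitespace-only (treat as 'empty string' for comparison)."""
--     if v is None:
--         return True
--     if isinstance(v, str):
--         return len(v.strip()) == 0
--     return False
--
-- def ocr_improvement_keys(parsed_a: dict | None, parsed_b: dict | None) -> list[str]:
--     """Keys where A is empty-string-like and B has a non-whitespace value."""
--     if not parsed_b:
--         return []
--     keys = set()
--     if parsed_a:
--         keys |= set(parsed_a.keys())
--     keys |= set(parsed_b.keys())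
--     keys |= {
--         "document_type",
--         "holder_or_account_name",
--         "primary_date",
--         "secondary_date",
--         "key_amount_or_address",
--         "any_id_or_case_number",
--     }
--     improved = []
--     for k in sorted(keys):
--         va = parsed_a.get(k) if parsed_a else None
--         vb = parsed_b.get(k) if parsed_b else None
--         if is_empty_string_value(va) and not is_empty_string_value(vb):
--             improved.append(k)
--     return improved
-- ===== SOURCE B (Python) =====
-- def ocr_improvement_keys(parsed_a: dict | None, parsed_b: dict | None) -> list[str]:
--     """Keys where A is empty-string-like and B has a non-whitespace value.
--
--     Only keys of parsed_b with a non-whitespace value can qualify, so walk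
--     sorted(parsed_b) directly instead of building the union-of-keys set.
--     """
--     if not parsed_b:
--         return []
--
--     def _empty(v) -> bool:
--         return v is None or (isinstance(v, str) and len(v.strip()) == 0)
--
--     return [k for k in sorted(parsed_b)
--             if not _empty(parsed_b[k])
--             and _empty(parsed_a.get(k) if parsed_a else None)]
-- ===== Notes on version B (the rewrite author's own statement) =====
-- stated objective: simpler
-- what changed: B drops the union-of-A/B/default-keys set entirely and filters sorted(parsed_b) directly (keys outside parsed_b can never qualify since their B-value is None), replacing the set-building pass and append loop with one comprehension.
import Mathlib
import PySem

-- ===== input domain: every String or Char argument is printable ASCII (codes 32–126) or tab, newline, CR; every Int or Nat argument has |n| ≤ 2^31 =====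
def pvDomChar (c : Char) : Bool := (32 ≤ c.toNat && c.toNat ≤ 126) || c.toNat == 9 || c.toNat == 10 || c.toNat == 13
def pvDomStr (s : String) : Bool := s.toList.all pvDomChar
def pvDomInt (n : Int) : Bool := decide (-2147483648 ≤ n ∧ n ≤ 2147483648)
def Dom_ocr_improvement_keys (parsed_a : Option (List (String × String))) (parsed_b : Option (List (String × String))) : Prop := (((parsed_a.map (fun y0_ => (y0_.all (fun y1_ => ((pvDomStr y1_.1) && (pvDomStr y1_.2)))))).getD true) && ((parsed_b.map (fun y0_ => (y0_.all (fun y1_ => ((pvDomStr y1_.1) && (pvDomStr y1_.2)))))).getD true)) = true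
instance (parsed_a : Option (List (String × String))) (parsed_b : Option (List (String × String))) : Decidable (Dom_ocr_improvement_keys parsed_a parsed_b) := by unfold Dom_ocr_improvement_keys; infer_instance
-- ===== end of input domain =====

-- B drops A's union-of-keys set and filters sorted(parsed_b.keys()) directly; objective: simpler.

-- ===== PORT A =====
-- is_empty_string_value(v): values here are None or str, so Option String
def pvIsEmptyStrVal (v : Option String) : Bool :=
  match v with
  | none => true                                      -- v is None
  | some s => PySem.Str.len (PySem.Str.strip s) == 0  -- len(v.strip()) == 0

def ocr_improvement_keys (parsed_a : Option (List (String × String))) (parsed_b : Option (List (String × String))) : List String :=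
  let db := PySem.Dict.ofList (parsed_b.getD [])
  if db.items.isEmpty then []                        -- if not parsed_b: return []
  else
    let da := PySem.Dict.ofList (parsed_a.getD [])
    let keys : PySem.Set String := PySem.Set.empty
    let keys := if da.items.isEmpty then keys else PySem.Set.union keys da.keys  -- if parsed_a: keys |= set(parsed_a.keys())
    let keys := PySem.Set.union keys db.keys                                     -- keys |= set(parsed_b.keys())
    let keys := PySem.Set.union keys (PySem.Set.ofList
      ["document_type", "holder_or_account_name", "primary_date", "secondary_date",
       "key_amount_or_address", "any_id_or_case_number"])                        -- keys |= {…}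
    (PySem.List.sorted keys (fun x => x) false).foldl (fun improved k =>
      let va := if da.items.isEmpty then none else da.get? k
      let vb := if db.items.isEmpty then none else db.get? k
      if pvIsEmptyStrVal va && !pvIsEmptyStrVal vb then improved ++ [k] else improved) []

-- ===== PORT B =====
def pvEmptyLike (v : Option String) : Bool :=
  match v with
  | none => true
  | some s => PySem.Str.len (PySem.Str.strip s) == 0

def ocr_improvement_keys_alt (parsed_a : Option (List (String × String))) (parsed_b : Option (List (String × String))) : List String :=
  let db := PySem.Dict.ofList (parsed_b.getD [])
  if db.items.isEmpty then []
  else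
    let da := PySem.Dict.ofList (parsed_a.getD [])
    (PySem.List.sorted db.keys (fun x => x) false).filter (fun k =>
      !pvEmptyLike (db.get? k) &&
      pvEmptyLike (if da.items.isEmpty then none else da.get? k))

-- ===== PRECONDITION & SPEC =====
def Spec_ocr_improvement_keys (parsed_a : Option (List (String × String))) (parsed_b : Option (List (String × String))) (out : List String) : Prop := out = ocr_improvement_keys_alt parsed_a parsed_b
instance (parsed_a : Option (List (String × String))) (parsed_b : Option (List (String × String))) (out : List String) : Decidable (Spec_ocr_improvement_keys parsed_a parsed_b out) := by unfold Spec_ocr_improvement_keys; infer_instance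

-- ===== CLAIM (what is proved, stated in full; the proofs are below) =====
def Claim_equal_ocr_improvement_keys : Prop := ∀ (parsed_a : Option (List (String × String))) (parsed_b : Option (List (String × String))), Dom_ocr_improvement_keys parsed_a parsed_b → Spec_ocr_improvement_keys parsed_a parsed_b (ocr_improvement_keys parsed_a parsed_b)

-- ===== LEMMAS AND PROOFS =====

-- filtering the sorted big (nodup) list by a predicate that only holds inside the
-- smaller (nodup, subset) list equals filtering the sorted small list
theorem pv_filter_sorted_subset (U K : List String) (p : String → Bool)
    (hU : U.Nodup) (hK : K.Nodup) (hsub : ∀ k ∈ K, k ∈ U)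
    (hp : ∀ k, p k = true → k ∈ K) :
    (PySem.List.sorted U (fun x => x) false).filter p
      = (PySem.List.sorted K (fun x => x) false).filter p := by
  apply List.Perm.eq_of_pairwise (le := (· ≤ ·))
  · intro a b _ _ hab hba; exact le_antisymm hab hba
  · exact List.Pairwise.sublist List.filter_sublist (PySem.List.sorted_pairwise U (fun x => x))
  · exact List.Pairwise.sublist List.filter_sublist (PySem.List.sorted_pairwise K (fun x => x))
  · apply (List.perm_ext_iff_of_nodup ?_ ?_).mpr
    · intro x
      simp only [List.mem_filter, PySem.List.mem_sorted]
      constructor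
      · rintro ⟨_, hx⟩; exact ⟨hp x hx, hx⟩
      · rintro ⟨hx, hpx⟩; exact ⟨hsub x hx, hpx⟩
    · exact (((PySem.List.sorted_perm U (fun x => x) false).nodup_iff).mpr hU).filter p
    · exact (((PySem.List.sorted_perm K (fun x => x) false).nodup_iff).mpr hK).filter p

-- ===== VERDICT (by name: the statement is the Claim_ definition above) =====
theorem ocr_improvement_keys_spec : Claim_equal_ocr_improvement_keys := by
  intro parsed_a parsed_b _
  unfold Spec_ocr_improvement_keys ocr_improvement_keys ocr_improvement_keys_alt
  set db := PySem.Dict.ofList (parsed_b.getD []) with hdb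
  by_cases hb : db.items.isEmpty
  · simp [hb]
  · simp only [Bool.not_eq_true] at hb
    simp only [hb, Bool.false_eq_true, if_false]
    set da := PySem.Dict.ofList (parsed_a.getD []) with hda
    rw [PySem.List.foldl_append_if
      (p := fun k => pvIsEmptyStrVal (if da.items.isEmpty then none else da.get? k) &&
        !pvIsEmptyStrVal (db.get? k))
      (f := fun k => k)]
    rw [List.nil_append, List.map_id']
    rw [pv_filter_sorted_subset _ db.keys _ ?hU (PySem.Dict.nodup_keys_ofList _) ?hsub ?hp]
    case hU =>
      apply PySem.Set.nodup_union
      apply PySem.Set.nodup_union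
      split
      · exact List.nodup_nil
      · exact PySem.Set.nodup_union _ _ List.nodup_nil
    case hsub =>
      intro k hk
      rw [PySem.Set.mem_union, PySem.Set.mem_union]
      exact Or.inl (Or.inr hk)
    case hp =>
      intro k hk
      simp only [Bool.and_eq_true, Bool.not_eq_eq_eq_not, Bool.not_true] at hk
      rw [← PySem.Dict.contains_iff_mem_keys, PySem.Dict.contains_eq_isSome_get?]
      rcases h : db.get? k with _ | v
      · rw [h] at hk; simp [pvIsEmptyStrVal] at hk
      · rfl
    apply List.filter_congr
    intro k _
    rw [Bool.and_comm]
    rfl
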